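-- pv_equiv track=rewrite | github.com/Vladislav0504/Python-mini-programs | balls.py | Balls
-- ===== SOURCE A (Python) =====
-- def Balls(A):
--   s = 0
--   D = [[A[1],1]]
--   l = 1
--   for i in range(2,A[0] + 1):
--     if A[i] == D[l - 1][0]:
--       D[l - 1][1] += 1
--     else:
--       if D[l - 1][1] >= 3:
--         s += D[l - 1][1]
--         D.pop()
--         l -= 1
--         if A[i] == D[l - 1][0]:
--           D[l - 1][1] += 1
--         else:
--           D.append([A[i],1])
--           l += 1
--       else:
--         D.append([A[i],1])
--         l += 1
--   if D[l - 1][1] >= 3: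
--     s += D[l - 1][1]
--   return s
-- ===== SOURCE B (Python) =====
-- def Balls(A):
--     n = A[0]
--     # phase 1: run-length encode the balls A[1..n] (index-based, like the input format demands)
--     runs = []
--     for i in range(1, n + 1):
--         x = A[i]
--         if runs and runs[-1][0] == x:
--             runs[-1][1] += 1
--         else:
--             runs.append([x, 1])
--     # phase 2: collapse the runs with a stack, summing removed run lengths
--     s = 0
--     stack = []
--     for v, c in runs:
--         if stack and stack[-1][0] == v:
--             stack[-1][1] += c
--         elif stack and stack[-1][1] >= 3:
--             s += stack.pop()[1]
--             if stack and stack[-1][0] == v: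
--                 stack[-1][1] += c
--             else:
--                 stack.append([v, c])
--         else:
--             stack.append([v, c])
--     if stack and stack[-1][1] >= 3:
--         s += stack[-1][1]
--     return s
-- ===== Notes on version B (the rewrite author's own statement) =====
-- stated objective: alternative
-- what changed: A's single interleaved ball-by-ball pass (stack updated per ball) is split into two phases: first a run-length encoding of the balls, then a stack collapse over whole runs that merges a run's full count in one step; Pre_ excludes exactly the inputs on which A raises IndexError (a malformed header or length field, or a ball prefix that fully collapses, making A read the top of an emptied stack).
import Mathlib
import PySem

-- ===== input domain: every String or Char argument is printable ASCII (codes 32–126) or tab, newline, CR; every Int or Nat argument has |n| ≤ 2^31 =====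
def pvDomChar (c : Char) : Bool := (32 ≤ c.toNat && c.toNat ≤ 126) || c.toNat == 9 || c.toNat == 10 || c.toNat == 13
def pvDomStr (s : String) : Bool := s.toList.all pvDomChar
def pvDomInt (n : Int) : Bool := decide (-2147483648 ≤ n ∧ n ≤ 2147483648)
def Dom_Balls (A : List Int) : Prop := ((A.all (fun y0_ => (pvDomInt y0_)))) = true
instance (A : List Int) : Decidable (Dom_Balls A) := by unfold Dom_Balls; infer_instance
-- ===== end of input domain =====

-- B re-implements A as two phases (run-length encode the balls, then collapse the run
-- list with a stack) instead of A's single interleaved ball-by-ball pass: a different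
-- decomposition of the same cost ('alternative', no speed claim).

-- ===== PORT A =====
-- A's stack D (Python list, top at the end) is ported with the top at the HEAD.
-- One iteration of A's loop, given the current ball x (A's loop body, branches in order).
def ballsStep (st : Int × List (Int × Int)) (x : Int) : Int × List (Int × Int) :=
  match st with
  | (s, (v, c) :: rest) =>
    if x = v then (s, (v, c + 1) :: rest)
    else if 3 ≤ c then
      match rest with
      | (v2, c2) :: r2 =>
        if x = v2 then (s + c, (v2, c2 + 1) :: r2) else (s + c, (x, 1) :: (v2, c2) :: r2)
      | [] => (s + c, [])  -- Python raises IndexError here (D[-1] on the emptied stack); outside Pre_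
    else (s, (x, 1) :: (v, c) :: rest)
  | (s, []) => (s, [])     -- unreachable: D starts nonempty and the crash is outside Pre_

-- the final 'if <top count> >= 3: s += <top count>' — textually the same last two lines
-- in Source A (on D) and in Source B (on stack), so both ports share this helper
def ballsFinish (st : Int × List (Int × Int)) : Int :=
  match st with
  | (s, (_, c) :: _) => if 3 ≤ c then s + c else s
  | (s, []) => s           -- in A, Python raises IndexError here (outside Pre_); in B, stack may be empty

def Balls (A : List Int) : Int :=
  ballsFinish ((PySem.List.pyRange 2 (PySem.List.pyGetD A 0 0 + 1) 1).foldl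
    (fun st i => ballsStep st (PySem.List.pyGetD A i 0))
    (0, [(PySem.List.pyGetD A 1 0, 1)]))

-- ===== PORT B =====
-- phase 1 of Source B: extend the run-length encoding by one ball (runs kept newest-first;
-- Source B appends at the end of its list, the port reverses once before phase 2).
def rleStep (runs : List (Int × Int)) (x : Int) : List (Int × Int) :=
  match runs with
  | (v, c) :: rest => if v = x then (v, c + 1) :: rest else (x, 1) :: (v, c) :: rest
  | [] => [(x, 1)]

-- phase 2 of Source B: feed one whole run (v, c) to the collapse stack (top at the head)
def collapseStep (st : Int × List (Int × Int)) (r : Int × Int) : Int × List (Int × Int) :=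
  match st, r with
  | (s, (tv, tc) :: rest), (v, c) =>
    if tv = v then (s, (tv, tc + c) :: rest)
    else if 3 ≤ tc then
      match rest with
      | (tv2, tc2) :: r2 =>
        if tv2 = v then (s + tc, (tv2, tc2 + c) :: r2) else (s + tc, (v, c) :: (tv2, tc2) :: r2)
      | [] => (s + tc, [(v, c)])
    else (s, (v, c) :: (tv, tc) :: rest)
  | (s, []), (v, c) => (s, [(v, c)])

def Balls_alt (A : List Int) : Int :=
  ballsFinish ((((PySem.List.pyRange 1 (PySem.List.pyGetD A 0 0 + 1) 1).foldl
      (fun rs i => rleStep rs (PySem.List.pyGetD A i 0)) []).reverse).foldl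
    collapseStep (0, []))

-- ===== PRECONDITION & SPEC =====
-- Pre_ excludes exactly the inputs on which A raises IndexError: lists too short for the
-- base access A[1], a length field A[0] beyond the list, and inputs on which a prefix of
-- the balls fully collapses (A then reads D[-1] of the emptied stack).  That last crash
-- is inherently data-dependent, so Pre_ states it with an explicit sum-free run-stack
-- predicate, separate from both ports.
def safeLoop : Int → Int → List (Int × Int) → List Int → Bool
  | _, _, _, [] => true
  | v, c, [], x :: xs =>
    if x = v then safeLoop v (c + 1) [] xs
    else if 3 ≤ c then false
    else safeLoop x 1 [(v, c)] xs
  | v, c, (v2, c2) :: s2, x :: xs =>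
    if x = v then safeLoop v (c + 1) ((v2, c2) :: s2) xs
    else if 3 ≤ c then
      (if x = v2 then safeLoop v2 (c2 + 1) s2 xs else safeLoop x 1 ((v2, c2) :: s2) xs)
    else safeLoop x 1 ((v, c) :: (v2, c2) :: s2) xs

def Pre_Balls (A : List Int) : Prop :=
  2 ≤ A.length ∧ PySem.List.pyGetD A 0 0 < (A.length : Int) ∧
    safeLoop (PySem.List.pyGetD A 1 0) 1 []
      ((A.drop 2).take (PySem.List.pyGetD A 0 0 - 1).toNat) = true

instance (A : List Int) : Decidable (Pre_Balls A) := by unfold Pre_Balls; infer_instance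

def pvWitness_Balls : List Int := [4, 1, 2, 2, 1]

def Spec_Balls (A : List Int) (out : Int) : Prop := out = Balls_alt A
instance (A : List Int) (out : Int) : Decidable (Spec_Balls A out) := by unfold Spec_Balls; infer_instance

-- ===== CLAIM (what is proved, stated in full; the proofs are below) =====
def Claim_equal_Balls : Prop := ∀ (A : List Int), Dom_Balls A → Pre_Balls A → Spec_Balls A (Balls A)

-- ===== LEMMAS AND PROOFS =====

theorem safeLoop_cons_nil (v c x : Int) (xs : List Int) :
    safeLoop v c [] (x :: xs)
      = if x = v then safeLoop v (c + 1) [] xs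
        else if 3 ≤ c then false
        else safeLoop x 1 [(v, c)] xs := rfl

theorem safeLoop_cons_cons (v c v2 c2 x : Int) (s2 : List (Int × Int)) (xs : List Int) :
    safeLoop v c ((v2, c2) :: s2) (x :: xs)
      = if x = v then safeLoop v (c + 1) ((v2, c2) :: s2) xs
        else if 3 ≤ c then
          (if x = v2 then safeLoop v2 (c2 + 1) s2 xs else safeLoop x 1 ((v2, c2) :: s2) xs)
        else safeLoop x 1 ((v, c) :: (v2, c2) :: s2) xs := rfl

-- feeding one run of c+1 equal balls to the collapse stack = a run of c, then one ball
theorem collapseStep_succ (st : Int × List (Int × Int)) (v c : Int) :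
    collapseStep st (v, c + 1) = ballsStep (collapseStep st (v, c)) v := by
  obtain ⟨s, stk⟩ := st
  match stk with
  | [] => simp [collapseStep, ballsStep]
  | (tv, tc) :: rest =>
    by_cases h1 : tv = v
    · simp [collapseStep, ballsStep, h1, add_assoc]
    · have hv : ¬ v = tv := fun h => h1 h.symm
      by_cases h2 : (3 : Int) ≤ tc
      · match rest with
        | [] => simp [collapseStep, ballsStep, h1, h2]
        | (tv2, tc2) :: r2 =>
          by_cases h3 : tv2 = v
          · simp [collapseStep, ballsStep, h1, h2, h3, add_assoc]
          · have h3' : ¬ v = tv2 := fun h => h3 h.symm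
            simp [collapseStep, ballsStep, h1, h2, h3, h3']
      · simp [collapseStep, ballsStep, h1, h2]

-- a fresh run of length 1 behaves like a single ball, provided A would not crash there
theorem collapseStep_one (s : Int) (tv tc : Int) (rest : List (Int × Int)) (x : Int)
    (hx : x ≠ tv) (hsafe : ¬ (3 ≤ tc) ∨ rest ≠ []) :
    collapseStep (s, (tv, tc) :: rest) (x, 1) = ballsStep (s, (tv, tc) :: rest) x := by
  have hv : ¬ tv = x := fun h => hx h.symm
  by_cases h2 : (3 : Int) ≤ tc
  · match rest with
    | [] =>
      rcases hsafe with h | h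
      · exact absurd h2 h
      · exact absurd rfl h
    | (tv2, tc2) :: r2 =>
      by_cases h3 : tv2 = x
      · subst h3
        simp [collapseStep, ballsStep, hv, hx, h2]
      · have h3' : ¬ x = tv2 := fun h => h3 h.symm
        simp [collapseStep, ballsStep, hv, hx, h2, h3, h3']
  · simp [collapseStep, ballsStep, hv, hx, h2]

-- the head of the rle fold is the last ball seen
theorem rle_head (ys : List Int) (hys : ys ≠ []) (rs0 : List (Int × Int)) :
    ∃ c rest, List.foldl rleStep rs0 ys = (ys.getLastD 0, c) :: rest := by
  induction ys using List.reverseRecOn with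
  | nil => exact absurd rfl hys
  | append_singleton zs x ih =>
    rw [List.foldl_append]
    match h : List.foldl rleStep rs0 zs with
    | [] => exact ⟨1, [], by simp [rleStep]⟩
    | (v, c) :: rest =>
      by_cases hv : v = x
      · exact ⟨c + 1, rest, by simp [rleStep, hv]⟩
      · exact ⟨1, (v, c) :: rest, by simp [rleStep, hv]⟩

-- safety of a ball list is inherited by its prefixes
theorem safe_prefix (ys zs : List Int) : ∀ (v c : Int) (stk : List (Int × Int)),
    safeLoop v c stk (ys ++ zs) = true → safeLoop v c stk ys = true := by
  induction ys with
  | nil => intro v c stk _; rfl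
  | cons x xs ih =>
    intro v c stk h
    rw [List.cons_append] at h
    cases stk with
    | nil =>
      rw [safeLoop_cons_nil] at h ⊢
      split_ifs at h ⊢ with h1 h2
      all_goals first | exact ih _ _ _ h | exact h | simp at h
    | cons p s2 =>
      obtain ⟨v2, c2⟩ := p
      rw [safeLoop_cons_cons] at h ⊢
      split_ifs at h ⊢ with h1 h2 h3
      all_goals first | exact ih _ _ _ h | exact h | simp at h

-- lock-step: under safeLoop, A's loop keeps a nonempty stack whose top value is the last
-- ball processed, and the remaining balls are still safe from the reached state
theorem lockstep (bs : List Int) : ∀ (v c : Int) (stk : List (Int × Int)) (s : Int)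
    (xs : List Int), safeLoop v c stk (bs ++ xs) = true →
    ∃ s' c' stk', List.foldl ballsStep (s, (v, c) :: stk) bs
        = (s', ((v :: bs).getLastD 0, c') :: stk')
      ∧ safeLoop ((v :: bs).getLastD 0) c' stk' xs = true := by
  induction bs with
  | nil => intro v c stk s xs h; exact ⟨s, c, stk, by simp, by simpa using h⟩
  | cons b bt ih =>
    intro v c stk s xs h
    rw [List.cons_append] at h
    have hlast : ∀ (w : Int), (w :: b :: bt).getLastD 0 = (b :: bt).getLastD 0 := by
      intro w; simp [List.getLastD_cons]
    rw [hlast, List.foldl_cons]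
    by_cases h1 : b = v
    · -- merge into the top run
      have hh : safeLoop v (c + 1) stk (bt ++ xs) = true := by
        cases stk with
        | nil => rw [safeLoop_cons_nil, if_pos h1] at h; exact h
        | cons p s2 =>
          obtain ⟨v2, c2⟩ := p; rw [safeLoop_cons_cons, if_pos h1] at h; exact h
      have hstep : ballsStep (s, (v, c) :: stk) b = (s, (v, c + 1) :: stk) := by
        simp only [ballsStep]; rw [if_pos h1]
      rw [hstep]
      obtain ⟨s', c', stk', he, hs⟩ := ih v (c + 1) stk s xs hh
      have hsw : (v :: bt).getLastD 0 = (b :: bt).getLastD 0 := by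
        cases bt <;> simp [List.getLastD_cons, h1]
      exact ⟨s', c', stk', by rw [he, hsw], by rw [← hsw]; exact hs⟩
    · by_cases h2 : (3 : Int) ≤ c
      · -- pop the top run
        cases stk with
        | nil => rw [safeLoop_cons_nil, if_neg h1, if_pos h2] at h; simp at h
        | cons p s2 =>
          obtain ⟨v2, c2⟩ := p
          rw [safeLoop_cons_cons, if_neg h1, if_pos h2] at h
          by_cases h3 : b = v2
          · rw [if_pos h3] at h
            have hstep : ballsStep (s, (v, c) :: (v2, c2) :: s2) b
                = (s + c, (v2, c2 + 1) :: s2) := by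
              simp only [ballsStep]; rw [if_neg h1, if_pos h2, if_pos h3]
            rw [hstep]
            obtain ⟨s', c', stk', he, hs⟩ := ih v2 (c2 + 1) s2 (s + c) xs h
            have hsw : (v2 :: bt).getLastD 0 = (b :: bt).getLastD 0 := by
              cases bt <;> simp [List.getLastD_cons, h3]
            exact ⟨s', c', stk', by rw [he, hsw], by rw [← hsw]; exact hs⟩
          · rw [if_neg h3] at h
            have hstep : ballsStep (s, (v, c) :: (v2, c2) :: s2) b
                = (s + c, (b, 1) :: (v2, c2) :: s2) := by
              simp only [ballsStep]; rw [if_neg h1, if_pos h2, if_neg h3]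
            rw [hstep]
            exact ih b 1 ((v2, c2) :: s2) (s + c) xs h
      · -- push a new run
        have hh : safeLoop b 1 ((v, c) :: stk) (bt ++ xs) = true := by
          cases stk with
          | nil => rw [safeLoop_cons_nil, if_neg h1, if_neg h2] at h; exact h
          | cons p s2 =>
            obtain ⟨v2, c2⟩ := p; rw [safeLoop_cons_cons, if_neg h1, if_neg h2] at h; exact h
        have hstep : ballsStep (s, (v, c) :: stk) b = (s, (b, 1) :: (v, c) :: stk) := by
          simp only [ballsStep]; rw [if_neg h1, if_neg h2]
        rw [hstep]
        exact ih b 1 ((v, c) :: stk) s xs hh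

-- main bridge: B's two-phase computation over b0 :: bs equals A's single pass over bs
theorem phases_eq_pass (b0 : Int) (bs : List Int)
    (hsafe : safeLoop b0 1 [] bs = true) :
    List.foldl collapseStep (0, []) (List.foldl rleStep [] (b0 :: bs)).reverse
      = List.foldl ballsStep (0, [(b0, 1)]) bs := by
  induction bs using List.reverseRecOn with
  | nil => simp [rleStep, collapseStep]
  | append_singleton zs x ih =>
    have hzs : safeLoop b0 1 [] zs = true := safe_prefix zs [x] _ _ _ hsafe
    obtain ⟨k, rs, hF⟩ := rle_head (b0 :: zs) (by simp) []
    have ih' := ih hzs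
    rw [hF, show ((((b0 :: zs).getLastD 0, k) :: rs)).reverse
        = rs.reverse ++ [((b0 :: zs).getLastD 0, k)] by simp,
      List.foldl_append, List.foldl_cons, List.foldl_nil] at ih'
    rw [show b0 :: (zs ++ [x]) = (b0 :: zs) ++ [x] by simp, List.foldl_append, hF,
      List.foldl_append, List.foldl_cons, List.foldl_nil, List.foldl_cons, List.foldl_nil]
    obtain ⟨s', c', stk', he, hs⟩ := lockstep zs b0 1 [] 0 [x] hsafe
    by_cases hx : (b0 :: zs).getLastD 0 = x
    · -- x extends the last run: rleStep merges, collapseStep_succ peels the extra ball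
      have hr : rleStep (((b0 :: zs).getLastD 0, k) :: rs) x
          = ((b0 :: zs).getLastD 0, k + 1) :: rs := by
        simp only [rleStep]; rw [if_pos hx]
      rw [hr, show ((((b0 :: zs).getLastD 0, k + 1) :: rs)).reverse
          = rs.reverse ++ [((b0 :: zs).getLastD 0, k + 1)] by simp,
        List.foldl_append, List.foldl_cons, List.foldl_nil, collapseStep_succ, ih', ← hx]
    · -- x starts a new run: rleStep pushes (x,1), collapseStep_one matches one ballsStep
      have hxne : x ≠ (b0 :: zs).getLastD 0 := fun h => hx h.symm
      have hr : rleStep (((b0 :: zs).getLastD 0, k) :: rs) x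
          = (x, 1) :: ((b0 :: zs).getLastD 0, k) :: rs := by
        simp only [rleStep]; rw [if_neg hx]
      have hcond : ¬ (3 ≤ c') ∨ stk' ≠ [] := by
        cases stk' with
        | cons p s2 => exact Or.inr (by simp)
        | nil =>
          by_cases h2 : (3 : Int) ≤ c'
          · rw [safeLoop_cons_nil, if_neg hxne, if_pos h2] at hs; simp at hs
          · exact Or.inl h2
      rw [hr, show (((x, 1) :: ((b0 :: zs).getLastD 0, k) :: rs)).reverse
          = rs.reverse ++ [((b0 :: zs).getLastD 0, k)] ++ [(x, 1)] by simp,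
        List.foldl_append, List.foldl_append, List.foldl_cons, List.foldl_nil,
        List.foldl_cons, List.foldl_nil, ih', he,
        collapseStep_one s' _ c' stk' x hxne hcond]

-- an index loop reading pyGetD xs i equals a fold over the corresponding sublist
theorem foldl_range_getD {σ : Type} (f : σ → Int → σ) (xs : List Int) (b : Nat)
    (hb : b ≤ xs.length) : ∀ (a : Nat) (init : σ),
    (PySem.List.pyRange (a : Int) (b : Int) 1).foldl
        (fun st i => f st (PySem.List.pyGetD xs i 0)) init
      = ((xs.drop a).take (b - a)).foldl f init := by
  intro a
  induction hk : b - a generalizing a with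
  | zero =>
    intro init
    have hba : (b : Int) ≤ (a : Int) := by exact_mod_cast (by omega : b ≤ a)
    rw [PySem.List.pyRange_one_eq_nil hba]
    simp
  | succ k ih =>
    intro init
    have hab : a < b := by omega
    have ha : a < xs.length := by omega
    have hget : PySem.List.pyGetD xs ((a : Nat) : Int) 0 = xs[a] := by
      rw [PySem.List.pyGetD_natCast]
      exact List.getD_eq_getElem xs 0 ha
    rw [PySem.List.pyRange_one_cons (by exact_mod_cast hab), List.foldl_cons, hget,
      show ((a : Int) + 1) = (((a + 1 : Nat)) : Int) by push_cast; ring,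
      ih (a + 1) (by omega), List.drop_eq_getElem_cons ha, List.take_succ_cons,
      List.foldl_cons]

theorem pyGetD_one_eq (A : List Int) (h : 1 < A.length) :
    PySem.List.pyGetD A 1 0 = A[1] := by
  rw [show (1 : Int) = ((1 : Nat) : Int) by norm_num, PySem.List.pyGetD_natCast]
  exact List.getD_eq_getElem A 0 h

-- ===== VERDICT (by name: the statement is the Claim_ definition above) =====
theorem Balls_spec : Claim_equal_Balls := by
  intro A _hdom hpre
  obtain ⟨hlen, hn, hsafe⟩ := hpre
  unfold Spec_Balls Balls Balls_alt
  set n : Int := PySem.List.pyGetD A 0 0 with hn0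
  by_cases h2 : 2 ≤ n
  · -- main case: at least two balls are processed
    have hmlen : n.toNat < A.length := by omega
    have hA : (PySem.List.pyRange 2 (n + 1) 1).foldl
          (fun st i => ballsStep st (PySem.List.pyGetD A i 0))
          (0, [(PySem.List.pyGetD A 1 0, 1)])
        = ((A.drop 2).take (n.toNat + 1 - 2)).foldl ballsStep
          (0, [(PySem.List.pyGetD A 1 0, 1)]) := by
      rw [show n + 1 = ((n.toNat + 1 : Nat) : Int) by omega,
        show (2 : Int) = ((2 : Nat) : Int) by norm_num]
      exact foldl_range_getD _ A (n.toNat + 1) (by omega) 2 _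
    have hB : (PySem.List.pyRange 1 (n + 1) 1).foldl
          (fun rs i => rleStep rs (PySem.List.pyGetD A i 0)) []
        = ((A.drop 1).take (n.toNat + 1 - 1)).foldl rleStep [] := by
      rw [show n + 1 = ((n.toNat + 1 : Nat) : Int) by omega,
        show (1 : Int) = ((1 : Nat) : Int) by norm_num]
      exact foldl_range_getD _ A (n.toNat + 1) (by omega) 1 _
    have hb0 : PySem.List.pyGetD A 1 0 = A[1] := pyGetD_one_eq A (by omega)
    have hsplit : (A.drop 1).take (n.toNat + 1 - 1)
        = A[1] :: (A.drop 2).take (n.toNat + 1 - 2) := by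
      rw [List.drop_eq_getElem_cons (show 1 < A.length by omega),
        show n.toNat + 1 - 1 = (n.toNat + 1 - 2) + 1 by omega, List.take_succ_cons]
      rfl
    have hsafe' : safeLoop A[1] 1 [] ((A.drop 2).take (n.toNat + 1 - 2)) = true := by
      rw [← hb0, show n.toNat + 1 - 2 = (n - 1).toNat by omega]
      exact hsafe
    rw [hA, hB, hsplit, hb0]
    congr 1
    exact (phases_eq_pass A[1] _ hsafe').symm
  · -- degenerate case: n ≤ 1, A's loop is empty and both sides return 0
    push_neg at h2
    rw [PySem.List.pyRange_one_eq_nil (show n + 1 ≤ 2 by omega), List.foldl_nil]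
    by_cases h1 : n = 1
    · rw [show n + 1 = 1 + 1 by omega, PySem.List.pyRange_one_singleton]
      norm_num [ballsFinish, rleStep, collapseStep]
    · rw [PySem.List.pyRange_one_eq_nil (show n + 1 ≤ 1 by omega)]
      norm_num [ballsFinish]
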